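-- pv_equiv track=rewrite | github.com/Ydarp/projet_rolit | main.py | compte_couleur
-- ===== SOURCE A (Python) =====
-- def compte_couleur(t: list,bonus: list):
--     """Compte le nombre de pion de chaque couleur actuellement en jeu.
--
--     Args:
--         t (list): tableau a double entrée
--         bonus (list): liste des couleurs bonus
--     Returns:
--         compteur (dict): nombre de fois que chaque couleur apparait dans t
--     """
--     compteur  = {'R': 0, 'J': 0, 'V': 0,'B': 0}
--     for i in range(len(t)):
--         for j in range(len(t)):
--             if t[i][j] in compteur:
--                 if (i,j) in bonus:
--                     compteur[t[i][j]] += 5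
--                 else:
--                     compteur[t[i][j]] += 1
--     return compteur
-- ===== SOURCE B (Python) =====
-- def compte_couleur(t: list, bonus: list):
--     """Count pieces of each colour; bonus cells weigh 5 (1 base + 4 extra)."""
--     compteur = {'R': 0, 'J': 0, 'V': 0, 'B': 0}
--     n = len(t)
--     # base pass: +1 per cell of the n x n square whose colour is a key
--     for row in t:
--         for c in row[:n]:
--             if c in compteur:
--                 compteur[c] += 1
--     # bonus pass: +4 per distinct in-square bonus coordinate holding a key colour
--     for (i, j) in set(bonus):
--         if 0 <= i < n and 0 <= j < n:
--             c = t[i][j]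
--             if c in compteur:
--                 compteur[c] += 4
--     return compteur
-- ===== Notes on version B (the rewrite author's own statement) =====
-- stated objective: alternative
-- what changed: A tests every grid cell for membership in the bonus list inside the nested scan; B does one plain +1 counting pass over the rows and then a separate pass over set(bonus) adding +4 per distinct in-square bonus coordinate, removing the per-cell list scan (O(n^2+|bonus|) vs O(n^2*|bonus|), though not measurably faster on the generated inputs).
import Mathlib
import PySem

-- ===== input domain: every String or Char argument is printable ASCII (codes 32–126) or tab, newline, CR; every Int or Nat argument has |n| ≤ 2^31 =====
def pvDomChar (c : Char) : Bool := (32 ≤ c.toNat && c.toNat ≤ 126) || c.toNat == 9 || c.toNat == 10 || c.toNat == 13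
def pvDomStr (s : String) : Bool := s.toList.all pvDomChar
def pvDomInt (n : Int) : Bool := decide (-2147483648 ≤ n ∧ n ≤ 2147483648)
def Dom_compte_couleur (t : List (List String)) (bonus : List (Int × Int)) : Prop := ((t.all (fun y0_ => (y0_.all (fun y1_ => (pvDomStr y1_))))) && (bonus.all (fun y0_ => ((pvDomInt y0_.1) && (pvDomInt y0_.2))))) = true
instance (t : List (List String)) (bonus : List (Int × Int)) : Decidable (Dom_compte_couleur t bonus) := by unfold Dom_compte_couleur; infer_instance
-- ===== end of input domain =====

-- B replaces A's per-cell membership scan of `bonus` with one +1 counting pass over the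
-- rows plus a pass over set(bonus) adding +4 per distinct in-square bonus coordinate.

-- ===== PORT A =====
def compte_couleur (t : List (List String)) (bonus : List (Int × Int)) : List (String × Int) :=
  let compteur : PySem.Dict String Int :=
    ((((PySem.Dict.empty).insert "R" 0).insert "J" 0).insert "V" 0).insert "B" 0
  let n : Int := (t.length : Int)
  ((PySem.List.pyRange 0 n 1).foldl (fun d i =>
    (PySem.List.pyRange 0 n 1).foldl (fun d j =>
      let c := PySem.List.pyGetD (PySem.List.pyGetD t i []) j ""
      if d.contains c then
        if (i, j) ∈ bonus then d.modify c 0 (· + 5) else d.modify c 0 (· + 1)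
      else d) d) compteur).items

-- ===== PORT B =====
def compte_couleur_alt (t : List (List String)) (bonus : List (Int × Int)) : List (String × Int) :=
  let compteur : PySem.Dict String Int :=
    ((((PySem.Dict.empty).insert "R" 0).insert "J" 0).insert "V" 0).insert "B" 0
  let n : Int := (t.length : Int)
  let d1 := t.foldl (fun d row =>
    (PySem.List.slice row none (some n)).foldl (fun d c =>
      if d.contains c then d.modify c 0 (· + 1) else d) d) compteur
  let d2 := (PySem.Set.ofList bonus).foldl (fun d p =>
    if 0 ≤ p.1 ∧ p.1 < n ∧ 0 ≤ p.2 ∧ p.2 < n then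
      let c := PySem.List.pyGetD (PySem.List.pyGetD t p.1 []) p.2 ""
      if d.contains c then d.modify c 0 (· + 4) else d
    else d) d1
  d2.items

-- ===== PRECONDITION & SPEC =====
-- Pre_ excludes exactly the inputs where A raises IndexError: some row among the first
-- len(t) rows is shorter than len(t) (A reads t[i][j] for all i, j < len(t)).
def Pre_compte_couleur (t : List (List String)) (_bonus : List (Int × Int)) : Prop :=
  ∀ row ∈ t, t.length ≤ row.length
instance (t : List (List String)) (bonus : List (Int × Int)) : Decidable (Pre_compte_couleur t bonus) := by unfold Pre_compte_couleur; infer_instance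
def pvWitness_compte_couleur : List (List String) × (List (Int × Int)) :=
  ([["R", "J"], ["V", "V"]], [(0, 1), (5, 0)])
def Spec_compte_couleur (t : List (List String)) (bonus : List (Int × Int)) (out : List (String × Int)) : Prop := out = compte_couleur_alt t bonus
instance (t : List (List String)) (bonus : List (Int × Int)) (out : List (String × Int)) : Decidable (Spec_compte_couleur t bonus out) := by unfold Spec_compte_couleur; infer_instance

-- ===== CLAIM (what is proved, stated in full; the proofs are below) =====
def Claim_equal_compte_couleur : Prop := ∀ (t : List (List String)) (bonus : List (Int × Int)), Dom_compte_couleur t bonus → Pre_compte_couleur t bonus → Spec_compte_couleur t bonus (compte_couleur t bonus)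

-- ===== LEMMAS AND PROOFS =====

-- the initial dict of both programs
def pvD0 : PySem.Dict String Int :=
  ((((PySem.Dict.empty).insert "R" 0).insert "J" 0).insert "V" 0).insert "B" 0

-- the colour at coordinate p of the grid
def pvCell (t : List (List String)) (p : Int × Int) : String :=
  PySem.List.pyGetD (PySem.List.pyGetD t p.1 []) p.2 ""

-- the n × n index square, in A's traversal order
def pvSq (n : Int) : List (Int × Int) :=
  PySem.List.pyRange 0 n 1 ×ˢ PySem.List.pyRange 0 n 1

-- the common loop step: bump the count of colour (c x) by w x if it is a key
def pvStep {α : Type} (c : α → String) (w : α → Int) :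
    PySem.Dict String Int → α → PySem.Dict String Int :=
  fun d x => if d.contains (c x) then d.modify (c x) 0 (· + w x) else d

theorem pvStep_keys {α : Type} (c : α → String) (w : α → Int)
    (l : List α) (d : PySem.Dict String Int) :
    (l.foldl (pvStep c w) d).keys = d.keys := by
  induction l generalizing d with
  | nil => rfl
  | cons x l ih =>
    simp only [List.foldl_cons]
    rw [ih]
    unfold pvStep
    by_cases hc : d.contains (c x) = true
    · simp only [hc, if_true]
      rw [PySem.Dict.keys_modify, PySem.Dict.keys_insert_of_contains]
      exact hc
    · simp [hc]

theorem pvStep_getD {α : Type} (c : α → String) (w : α → Int)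
    (l : List α) (d : PySem.Dict String Int) (k : String) :
    (l.foldl (pvStep c w) d).getD k 0
      = d.getD k 0 + ((l.filter (fun x => d.contains (c x) && (c x == k))).map w).sum := by
  induction l generalizing d with
  | nil => simp
  | cons x l ih =>
    simp only [List.foldl_cons, List.filter_cons]
    by_cases hc : d.contains (c x) = true
    · have hstep : pvStep c w d x = d.modify (c x) 0 (· + w x) := by simp [pvStep, hc]
      rw [hstep, ih]
      have hcont : ∀ y, (d.modify (c x) 0 (· + w x)).contains y = d.contains y := by
        intro y
        rw [PySem.Dict.contains_modify]
        by_cases hy : y = c x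
        · subst hy; simp [hc]
        · simp [beq_iff_eq, hy]
      rw [List.filter_congr (fun y _ => by rw [hcont (c y)])]
      rw [PySem.Dict.getD_modify]
      by_cases hk : c x = k
      · subst hk
        simp only [beq_self_eq_true, hc, Bool.and_self, if_true, List.map_cons, List.sum_cons]
        ring
      · have hbk : (c x == k) = false := by simp [hk]
        rw [if_neg (fun h => hk h.symm)]
        simp [hbk]
    · have hstep : pvStep c w d x = d := by simp [pvStep, hc]
      have : (d.contains (c x) && (c x == k)) = false := by simp [hc]
      rw [hstep, ih, this]
      simp

theorem pvA_eq (t : List (List String)) (bonus : List (Int × Int)) :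
    compte_couleur t bonus
      = ((pvSq (t.length : Int)).foldl
          (pvStep (pvCell t) (fun p => if p ∈ bonus then 5 else 1)) pvD0).items := by
  unfold compte_couleur pvSq pvD0
  rw [show (PySem.List.pyRange 0 (t.length : Int) 1 ×ˢ PySem.List.pyRange 0 (t.length : Int) 1)
        = (PySem.List.pyRange 0 (t.length : Int) 1).flatMap
            (fun i => (PySem.List.pyRange 0 (t.length : Int) 1).map (Prod.mk i)) from rfl]
  rw [List.foldl_flatMap]
  simp only [List.foldl_map]
  congr 1
  congr 1
  funext d i
  congr 1
  funext d j
  show _ = pvStep (pvCell t) (fun p => if p ∈ bonus then 5 else 1) d (i, j)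
  unfold pvStep pvCell
  by_cases hc : d.contains (PySem.List.pyGetD (PySem.List.pyGetD t i []) j "") = true
  · simp only [hc, if_true]
    by_cases hb : (i, j) ∈ bonus
    · simp [hb]
    · simp [hb]
  · simp [hc]

theorem pvB_eq (t : List (List String)) (bonus : List (Int × Int)) :
    compte_couleur_alt t bonus
      = (((PySem.Set.ofList bonus).filter
            (fun p => decide (0 ≤ p.1 ∧ p.1 < (t.length : Int) ∧ 0 ≤ p.2 ∧ p.2 < (t.length : Int)))).foldl
          (pvStep (pvCell t) (fun _ => 4))
          ((t.flatMap (fun row => row.take t.length)).foldl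
            (pvStep (fun c => c) (fun _ => 1)) pvD0)).items := by
  dsimp only [compte_couleur_alt, pvD0]
  rw [← List.foldl_flatMap]
  simp only [PySem.List.slice_to_natCast]
  rw [← PySem.List.foldl_ite_eq_foldl_filter]
  rfl

theorem pvSum_ite_mem (bonus : List (Int × Int)) (L : List (Int × Int)) :
    ((L.map (fun p => if p ∈ bonus then (5 : Int) else 1)).sum
      = (L.length : Int) + 4 * ((L.filter (fun p => decide (p ∈ bonus))).length : Int)) := by
  induction L with
  | nil => simp
  | cons x L ih =>
    simp only [List.map_cons, List.sum_cons, List.filter_cons, List.length_cons]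
    by_cases hb : x ∈ bonus
    · simp only [hb, if_true, decide_true, List.length_cons]
      push_cast
      omega
    · simp only [hb, if_false, decide_false]
      push_cast
      omega

theorem pvTake_eq_map_range {α : Type} (xs : List α) (d : α) (m : Nat) (h : m ≤ xs.length) :
    (List.range m).map (fun k => xs.getD k d) = xs.take m := by
  apply List.ext_getElem
  · simp [Nat.min_eq_left h]
  · intro i h1 h2
    simp only [List.getElem_map, List.getElem_range, List.getElem_take]
    have : i < m := by simpa using h1
    rw [List.getD_eq_getElem xs d (by omega)]

theorem pvCells_eq (t : List (List String)) (hpre : ∀ row ∈ t, t.length ≤ row.length) :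
    (pvSq (t.length : Int)).map (pvCell t) = t.flatMap (fun row => row.take t.length) := by
  unfold pvSq
  rw [show (PySem.List.pyRange 0 (t.length : Int) 1 ×ˢ PySem.List.pyRange 0 (t.length : Int) 1)
        = (PySem.List.pyRange 0 (t.length : Int) 1).flatMap
            (fun i => (PySem.List.pyRange 0 (t.length : Int) 1).map (Prod.mk i)) from rfl]
  rw [List.map_flatMap]
  have hinner : ∀ i ∈ PySem.List.pyRange 0 (t.length : Int) 1,
      ((PySem.List.pyRange 0 (t.length : Int) 1).map (Prod.mk i)).map (pvCell t)
        = (PySem.List.pyGetD t i []).take t.length := by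
    intro i hi
    rw [List.map_map]
    have hmem : PySem.List.pyGetD t i [] ∈ t := by
      apply PySem.List.pyGetD_mem
      · rw [PySem.List.mem_pyRange_one] at hi
        constructor <;> omega
    have hlen := hpre _ hmem
    rw [PySem.List.pyRange_zero_nat, List.map_map]
    have hcast : ∀ k : Nat, pvCell t (i, (k : Int)) = (PySem.List.pyGetD t i []).getD k "" := by
      intro k
      unfold pvCell
      simp [PySem.List.pyGetD_natCast]
    calc (List.range t.length).map ((pvCell t ∘ Prod.mk i) ∘ fun k : Nat => (k : Int))
        = (List.range t.length).map (fun k => (PySem.List.pyGetD t i []).getD k "") :=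
          List.map_congr_left (fun k _ => hcast k)
      _ = (PySem.List.pyGetD t i []).take t.length := pvTake_eq_map_range _ _ _ hlen
  rw [List.flatMap_congr hinner]
  conv_rhs => rw [← PySem.List.map_pyGetD_pyRange_zero' t ([] : List String)]
  rw [List.flatMap_map]
  simp [PySem.List.length_pyRange_one]

theorem pvMem_sq (n : Int) (p : Int × Int) :
    p ∈ pvSq n ↔ (0 ≤ p.1 ∧ p.1 < n ∧ 0 ≤ p.2 ∧ p.2 < n) := by
  unfold pvSq
  rw [List.mem_product (a := p.1) (b := p.2)]
  · simp only [PySem.List.mem_pyRange_one]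
    tauto

theorem pvGetD_eq (t : List (List String)) (bonus : List (Int × Int))
    (hpre : ∀ row ∈ t, t.length ≤ row.length) (k : String) (hk : pvD0.contains k = true) :
    ((pvSq (t.length : Int)).foldl
        (pvStep (pvCell t) (fun p => if p ∈ bonus then 5 else 1)) pvD0).getD k 0
    = (((PySem.Set.ofList bonus).filter
          (fun p => decide (0 ≤ p.1 ∧ p.1 < (t.length : Int) ∧ 0 ≤ p.2 ∧ p.2 < (t.length : Int)))).foldl
        (pvStep (pvCell t) (fun _ => 4))
        ((t.flatMap (fun row => row.take t.length)).foldl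
          (pvStep (fun c => c) (fun _ => 1)) pvD0)).getD k 0 := by
  have h0 : pvD0.getD k 0 = 0 := by
    have hmem := (PySem.Dict.contains_iff_mem_keys _ _).mp hk
    have hkeys : pvD0.keys = ["R", "J", "V", "B"] := by decide
    rw [hkeys] at hmem
    simp only [List.mem_cons] at hmem
    rcases hmem with h | h | h | (h | h) <;> first | (subst h; decide) | exact absurd h (by simp)
  have hpred : ∀ {α : Type} (c : α → String) (x : α),
      (pvD0.contains (c x) && (c x == k)) = (c x == k) := by
    intro α c x
    by_cases h : c x = k
    · rw [h]; simp [hk]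
    · simp [h]
  set n : Int := (t.length : Int) with hn
  set cells := t.flatMap (fun row => row.take t.length) with hcells
  set bonusf := (PySem.Set.ofList bonus).filter
      (fun p => decide (0 ≤ p.1 ∧ p.1 < n ∧ 0 ≤ p.2 ∧ p.2 < n)) with hbf
  set d1 := cells.foldl (pvStep (fun c => c) (fun _ => 1)) pvD0 with hd1
  have hd1keys : d1.keys = pvD0.keys := pvStep_keys _ _ _ _
  have hd1cont : ∀ y, d1.contains y = pvD0.contains y := by
    intro y
    rw [Bool.eq_iff_iff, PySem.Dict.contains_iff_mem_keys, PySem.Dict.contains_iff_mem_keys,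
        hd1keys]
  have hd1getD : d1.getD k 0 = ((cells.filter (fun c => c == k)).length : Int) := by
    rw [hd1, pvStep_getD, h0,
        List.filter_congr (fun x _ => hpred (fun c => c) x)]
    simp
  rw [pvStep_getD, h0, List.filter_congr (fun x _ => hpred (pvCell t) x), pvSum_ite_mem]
  rw [pvStep_getD, hd1getD]
  have hbpred : bonusf.filter (fun x => d1.contains (pvCell t x) && (pvCell t x == k))
      = bonusf.filter (fun x => pvCell t x == k) :=
    List.filter_congr (fun x _ => by rw [hd1cont (pvCell t x)]; exact hpred (pvCell t) x)
  rw [hbpred]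
  rw [show ((bonusf.filter (fun x => pvCell t x == k)).map (fun _ => (4:Int))).sum
        = 4 * ((bonusf.filter (fun x => pvCell t x == k)).length : Int) from by
      simp; ring]
  have hc1 : ((pvSq n).filter (fun p => pvCell t p == k)).length
      = (cells.filter (fun c => c == k)).length := by
    rw [hcells, ← pvCells_eq t hpre, ← List.countP_eq_length_filter,
        ← List.countP_eq_length_filter, List.countP_map]
    rfl
  have hc2 : (((pvSq n).filter (fun p => pvCell t p == k)).filter
        (fun p => decide (p ∈ bonus))).length
      = (bonusf.filter (fun x => pvCell t x == k)).length := by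
    apply List.Perm.length_eq
    apply (List.perm_ext_iff_of_nodup ?_ ?_).mpr
    · intro p
      simp only [List.mem_filter, pvMem_sq, hbf, PySem.Set.mem_ofList, decide_eq_true_eq]
      tauto
    · exact (((List.Nodup.product (PySem.List.nodup_pyRange_one 0 n)
        (PySem.List.nodup_pyRange_one 0 n)).filter _).filter _)
    · exact (PySem.Set.nodup_ofList bonus).filter _ |>.filter _
  rw [hc1, hc2]
  ring

-- ===== VERDICT (by name: the statement is the Claim_ definition above) =====
theorem compte_couleur_spec : Claim_equal_compte_couleur := by
  intro t bonus _hdom hpre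
  unfold Spec_compte_couleur
  rw [pvA_eq, pvB_eq]
  have hkA := pvStep_keys (pvCell t) (fun p => if p ∈ bonus then (5:Int) else 1) (pvSq (t.length : Int)) pvD0
  have hk1 := pvStep_keys (fun c => c) (fun _ => (1:Int)) (t.flatMap (fun row => row.take t.length)) pvD0
  have hkB := pvStep_keys (pvCell t) (fun _ => (4:Int))
      ((PySem.Set.ofList bonus).filter
        (fun p => decide (0 ≤ p.1 ∧ p.1 < (t.length : Int) ∧ 0 ≤ p.2 ∧ p.2 < (t.length : Int))))
      ((t.flatMap (fun row => row.take t.length)).foldl (pvStep (fun c => c) (fun _ => 1)) pvD0)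
  have hnd : pvD0.keys.Nodup := by decide
  rw [PySem.Dict.items_eq_map_keys _ (by rw [hkA]; exact hnd) 0,
      PySem.Dict.items_eq_map_keys _ (by rw [hkB, hk1]; exact hnd) 0,
      hkA, hkB, hk1]
  refine List.map_congr_left (fun k hkmem => ?_)
  have hc : pvD0.contains k = true := (PySem.Dict.contains_iff_mem_keys _ _).mpr hkmem
  exact congrArg (fun v => (k, v)) (pvGetD_eq t bonus hpre k hc)
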